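-- pv_equiv track=rewrite | github.com/M-Shrief/fastapi_sqlalchemy | fastapi_sqlalchemy/utils/auth.py | is_authorized
-- ===== SOURCE A (Python) =====
-- def is_authorized(onlyAuthorizedFor: list[str], permissions: list[str]):
--     isAuthorized: bool = False
--
--     for permission in permissions:
--         try:
--             onlyAuthorizedFor.index(permission)
--             # if it didn't raise an error
--             isAuthorized = True
--             break
--         except ValueError:
--             continue
--
--     return isAuthorized
-- ===== SOURCE B (Python) =====
-- def is_authorized(onlyAuthorizedFor: list[str], permissions: list[str]):
--     return bool(set(permissions) & set(onlyAuthorizedFor))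
-- ===== Notes on version B (the rewrite author's own statement) =====
-- stated objective: simpler
-- what changed: Replaces the element-wise loop with try/except around list.index by a single bulk set-intersection test, returning whether the intersection is non-empty.
import Mathlib
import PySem

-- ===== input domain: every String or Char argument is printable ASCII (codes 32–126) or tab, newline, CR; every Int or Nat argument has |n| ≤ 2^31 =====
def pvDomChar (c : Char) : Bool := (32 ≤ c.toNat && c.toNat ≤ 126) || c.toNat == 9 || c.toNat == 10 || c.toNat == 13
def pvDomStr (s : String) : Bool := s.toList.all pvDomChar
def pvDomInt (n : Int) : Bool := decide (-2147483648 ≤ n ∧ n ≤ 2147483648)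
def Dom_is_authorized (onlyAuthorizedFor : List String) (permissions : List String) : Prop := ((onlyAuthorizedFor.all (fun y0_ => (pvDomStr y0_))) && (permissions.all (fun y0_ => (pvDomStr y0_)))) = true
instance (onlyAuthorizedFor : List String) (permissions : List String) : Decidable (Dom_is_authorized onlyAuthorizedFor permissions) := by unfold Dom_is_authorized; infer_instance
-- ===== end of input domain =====

-- B replaces the per-element loop probing onlyAuthorizedFor.index with a single set-intersection non-emptiness test (objective: simpler).

-- ===== PORT A =====
-- loop over permissions; list.index raising ValueError ↦ index? = none; break on first hit
def is_authorized_loop (onlyAuthorizedFor : List String) : List String → Bool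
  | [] => false
  | p :: rest =>
    if (PySem.List.index? onlyAuthorizedFor p).isSome then true
    else is_authorized_loop onlyAuthorizedFor rest

def is_authorized (onlyAuthorizedFor : List String) (permissions : List String) : Bool :=
  is_authorized_loop onlyAuthorizedFor permissions

-- ===== PORT B =====
-- bool(set(permissions) & set(onlyAuthorizedFor))
def is_authorized_alt (onlyAuthorizedFor : List String) (permissions : List String) : Bool :=
  !(PySem.Set.inter (PySem.Set.ofList permissions) (PySem.Set.ofList onlyAuthorizedFor)).isEmpty

-- ===== PRECONDITION & SPEC =====
def Spec_is_authorized (onlyAuthorizedFor : List String) (permissions : List String) (out : Bool) : Prop := out = is_authorized_alt onlyAuthorizedFor permissions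
instance (onlyAuthorizedFor : List String) (permissions : List String) (out : Bool) : Decidable (Spec_is_authorized onlyAuthorizedFor permissions out) := by unfold Spec_is_authorized; infer_instance

-- ===== CLAIM (what is proved, stated in full; the proofs are below) =====
def Claim_equal_is_authorized : Prop := ∀ (onlyAuthorizedFor : List String) (permissions : List String), Dom_is_authorized onlyAuthorizedFor permissions → Spec_is_authorized onlyAuthorizedFor permissions (is_authorized onlyAuthorizedFor permissions)

-- ===== LEMMAS AND PROOFS =====

theorem is_authorized_loop_iff (o : List String) (ps : List String) :
    is_authorized_loop o ps = true ↔ ∃ p ∈ ps, p ∈ o := by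
  induction ps with
  | nil => simp [is_authorized_loop]
  | cons p rest ih =>
    simp only [is_authorized_loop]
    by_cases h : (PySem.List.index? o p).isSome
    · simp [(PySem.List.index?_isSome_iff o p).mp h]
    · have hpo : p ∉ o := by
        intro hm; exact h ((PySem.List.index?_isSome_iff o p).mpr hm)
      simp [ih, hpo]

theorem is_authorized_alt_iff (o : List String) (ps : List String) :
    is_authorized_alt o ps = true ↔ ∃ p ∈ ps, p ∈ o := by
  simp only [is_authorized_alt, Bool.not_eq_eq_eq_not, Bool.not_true,
    List.isEmpty_eq_false_iff_exists_mem]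
  constructor
  · rintro ⟨x, hx⟩
    have h1 := (PySem.Set.mem_inter (PySem.Set.ofList ps) (PySem.Set.ofList o) x).mp hx
    exact ⟨x, (PySem.Set.mem_ofList ps x).mp h1.1, (PySem.Set.mem_ofList o x).mp h1.2⟩
  · rintro ⟨x, hxp, hxo⟩
    exact ⟨x, (PySem.Set.mem_inter (PySem.Set.ofList ps) (PySem.Set.ofList o) x).mpr
      ⟨(PySem.Set.mem_ofList ps x).mpr hxp, (PySem.Set.mem_ofList o x).mpr hxo⟩⟩

-- ===== VERDICT (by name: the statement is the Claim_ definition above) =====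
theorem is_authorized_spec : Claim_equal_is_authorized := by
  intro o ps _
  unfold Spec_is_authorized is_authorized
  rcases hb : is_authorized_alt o ps with _ | _
  · rcases hl : is_authorized_loop o ps with _ | _
    · rfl
    · exact absurd ((is_authorized_alt_iff o ps).mpr ((is_authorized_loop_iff o ps).mp hl)) (by simp [hb])
  · exact (is_authorized_loop_iff o ps).mpr ((is_authorized_alt_iff o ps).mp hb)
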